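-- pv_equiv track=rewrite | github.com/tcjacker/Iruka-Virtual-File-System | iruka_vfs/command_parser.py | _contains_plain_input_redirect
-- ===== SOURCE A (Python) =====
-- def _contains_plain_input_redirect(cmd: str) -> bool:
--     idx = 0
--     while idx < len(cmd):
--         char = cmd[idx]
--         if char != "<":
--             idx += 1
--             continue
--         next_char = cmd[idx + 1] if idx + 1 < len(cmd) else ""
--         prev_char = cmd[idx - 1] if idx > 0 else ""
--         if next_char == "<":
--             idx += 2
--             continue
--         if prev_char == "<":
--             idx += 1
--             continue
--         return True
--     return False
-- ===== SOURCE B (Python) =====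
-- def _contains_plain_input_redirect(cmd: str) -> bool:
--     # Single pass counting the length of the current run of consecutive '<';
--     # an input redirect is a maximal run of length exactly 1.
--     run = 0
--     for ch in cmd:
--         if ch == "<":
--             run += 1
--         else:
--             if run == 1:
--                 return True
--             run = 0
--     return run == 1
-- ===== Notes on version B (the rewrite author's own statement) =====
-- stated objective: simpler
-- what changed: Replaces A's index-based scan with lookahead/lookbehind and variable skips by a single run-length pass that counts the current run of consecutive '<' characters and reports a maximal run of length exactly 1.
import Mathlib
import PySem

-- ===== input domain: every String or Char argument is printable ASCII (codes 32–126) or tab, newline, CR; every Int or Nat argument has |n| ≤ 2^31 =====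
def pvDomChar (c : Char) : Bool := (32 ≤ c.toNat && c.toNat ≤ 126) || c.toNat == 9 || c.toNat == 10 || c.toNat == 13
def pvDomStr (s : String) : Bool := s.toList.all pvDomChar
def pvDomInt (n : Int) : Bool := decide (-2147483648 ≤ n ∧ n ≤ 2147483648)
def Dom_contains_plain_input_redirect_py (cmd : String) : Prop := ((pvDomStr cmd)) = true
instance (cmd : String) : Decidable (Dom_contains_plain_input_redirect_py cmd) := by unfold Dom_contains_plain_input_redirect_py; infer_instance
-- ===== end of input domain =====

-- B replaces A's index scan (lookahead/lookbehind, variable skips) by one run-length pass; objective: simpler.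

-- ===== PORT A =====
-- Literal port of A's while loop over character indices; next_char/prev_char are
-- Option Char (none stands for Python's "", which never equals "<" — exact here).
def pvLoopA (l : List Char) (idx : Nat) : Bool :=
  if h : idx < l.length then
    let char := l[idx]
    if char ≠ '<' then
      pvLoopA l (idx + 1)
    else
      let next_char : Option Char := if h2 : idx + 1 < l.length then some (l[idx + 1]) else none
      let prev_char : Option Char := if h0 : 0 < idx then some (l[idx - 1]'(by omega)) else none
      if next_char = some '<' then
        pvLoopA l (idx + 2)
      else if prev_char = some '<' then
        pvLoopA l (idx + 1)
      else
        true
  else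
    false
termination_by l.length - idx

def contains_plain_input_redirect_py (cmd : String) : Bool := pvLoopA cmd.toList 0

-- ===== PORT B =====
-- Port of Source B: one fold over the characters with the current '<'-run length.
def pvLoopB : List Char → Nat → Bool
  | [], run => run == 1
  | ch :: rest, run =>
    if ch = '<' then pvLoopB rest (run + 1)
    else if run == 1 then true
    else pvLoopB rest 0

def contains_plain_input_redirect_py_alt (cmd : String) : Bool := pvLoopB cmd.toList 0

-- ===== PRECONDITION & SPEC =====
def Spec_contains_plain_input_redirect_py (cmd : String) (out : Bool) : Prop := out = contains_plain_input_redirect_py_alt cmd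
instance (cmd : String) (out : Bool) : Decidable (Spec_contains_plain_input_redirect_py cmd out) := by unfold Spec_contains_plain_input_redirect_py; infer_instance

-- ===== CLAIM (what is proved, stated in full; the proofs are below) =====
def Claim_equal_contains_plain_input_redirect_py : Prop := ∀ (cmd : String), Dom_contains_plain_input_redirect_py cmd → Spec_contains_plain_input_redirect_py cmd (contains_plain_input_redirect_py cmd)

-- ===== LEMMAS AND PROOFS =====

-- Suffix view of A's loop: prev abstracts "previous char is '<'".
def pvG : Bool → List Char → Bool
  | _, [] => false
  | prev, c :: rest =>
    if c ≠ '<' then pvG false rest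
    else if rest.head? = some '<' then pvG true rest.tail
    else if prev then pvG true rest
    else true
termination_by _ l => l.length
decreasing_by
  · simp
  · simp [List.length_tail]
  · simp

-- pvLoopB's run only matters as 0 / 1 / ≥ 2.
theorem pvLoopB_ge_two (l : List Char) : ∀ r, 2 ≤ r → pvLoopB l r = pvLoopB l 2 := by
  induction l with
  | nil =>
    intro r hr
    have h1 : (r == 1) = false := by simp; omega
    simp [pvLoopB, h1]
  | cons c rest ih =>
    intro r hr
    by_cases hc : c = '<'
    · simp only [pvLoopB, if_pos hc]
      rw [ih (r + 1) (by omega), ih (2 + 1) (by omega)]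
    · have h1 : (r == 1) = false := by simp; omega
      simp [pvLoopB, hc, h1]

theorem pvG_eq_loopB (prev : Bool) (l : List Char) :
    pvG prev l = pvLoopB l (if prev then 2 else 0) := by
  induction hn : l.length using Nat.strong_induction_on generalizing prev l with
  | _ n ih =>
    match l with
    | [] => cases prev <;> simp [pvG, pvLoopB]
    | c :: rest =>
      by_cases hc : c = '<'
      · subst hc
        match rest with
        | [] => cases prev <;> simp [pvG, pvLoopB]
        | c2 :: rest2 =>
          by_cases h2 : c2 = '<'
          · subst h2
            have hG : pvG prev ('<' :: '<' :: rest2) = pvG true rest2 := by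
              simp [pvG]
            have hB : pvLoopB ('<' :: '<' :: rest2) (if prev then 2 else 0)
                = pvLoopB rest2 ((if prev then 2 else 0) + 1 + 1) := by
              simp [pvLoopB]
            rw [hG, hB, pvLoopB_ge_two rest2 _ (by cases prev <;> simp),
              ih rest2.length (by simp at hn; omega) true rest2 rfl, if_pos rfl]
          · have hG : pvG prev ('<' :: c2 :: rest2)
                = (if prev then pvG true (c2 :: rest2) else true) := by
              simp [pvG, h2]
            have hB : pvLoopB ('<' :: c2 :: rest2) (if prev then 2 else 0)
                = pvLoopB (c2 :: rest2) ((if prev then 2 else 0) + 1) := by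
              simp [pvLoopB]
            rw [hG, hB]
            cases prev with
            | true =>
              rw [if_pos rfl, pvLoopB_ge_two (c2 :: rest2) _ (by simp),
                ih (c2 :: rest2).length (by simp at hn ⊢; omega) true (c2 :: rest2) rfl, if_pos rfl]
            | false =>
              rw [if_neg (by simp), if_neg (by simp)]
              simp [pvLoopB, h2]
      · have hG : pvG prev (c :: rest) = pvG false rest := by
          simp [pvG, hc]
        have hB : pvLoopB (c :: rest) (if prev then 2 else 0) = pvLoopB rest 0 := by
          cases prev <;> simp [pvLoopB, hc]
        rw [hG, hB, ih rest.length (by simp at hn; omega) false rest rfl, if_neg (by simp)]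

-- Whether the character before position idx is '<'.
def pvPrevLt (l : List Char) (idx : Nat) : Bool := 0 < idx && (l[idx - 1]? == some '<')

theorem pvLoopA_eq_pvG (l : List Char) : ∀ idx, pvLoopA l idx = pvG (pvPrevLt l idx) (l.drop idx) := by
  intro idx
  induction h : l.length - idx using Nat.strong_induction_on generalizing idx with
  | _ n ih =>
    by_cases hlt : idx < l.length
    · have hdrop : l.drop idx = l[idx] :: l.drop (idx + 1) := List.drop_eq_getElem_cons hlt
      have hhead : (l.drop (idx + 1)).head? = l[idx + 1]? := List.head?_drop
      have htail : (l.drop (idx + 1)).tail = l.drop (idx + 2) := by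
        rw [List.tail_drop]
      have hnextd : (if h2 : idx + 1 < l.length then some (l[idx + 1]) else none) = l[idx + 1]? := by
        by_cases h2 : idx + 1 < l.length
        · rw [dif_pos h2, List.getElem?_eq_getElem h2]
        · rw [dif_neg h2, List.getElem?_eq_none (by omega)]
      have hprevd : (if h0 : 0 < idx then some (l[idx - 1]'(by omega)) else none)
          = (if 0 < idx then l[idx - 1]? else none) := by
        by_cases h0 : 0 < idx
        · rw [dif_pos h0, if_pos h0, List.getElem?_eq_getElem (by omega)]
        · rw [dif_neg h0, if_neg h0]
      by_cases hc : l[idx] = '<'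
      · have hGun : pvG (pvPrevLt l idx) (l.drop idx)
            = (if l[idx + 1]? = some '<' then pvG true (l.drop (idx + 2))
               else if pvPrevLt l idx then pvG true (l.drop (idx + 1)) else true) := by
          rw [hdrop, hc, pvG]
          simp only [hhead, htail]
          simp
        by_cases hn : l[idx + 1]? = some '<'
        · -- next is '<': A skips two
          have hn1 : idx + 1 < l.length := by
            by_contra hge
            rw [List.getElem?_eq_none (by omega)] at hn
            simp at hn
          have hA : pvLoopA l idx = pvLoopA l (idx + 2) := by
            rw [pvLoopA]
            have : (if h2 : idx + 1 < l.length then some (l[idx + 1]) else none) = some '<' := by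
              rw [hnextd]; exact hn
            simp [hlt, hc, this]
          have hprev2 : pvPrevLt l (idx + 2) = true := by
            simp [pvPrevLt, hn]
          rw [hA, ih (l.length - (idx + 2)) (by omega) (idx + 2) rfl, hGun, if_pos hn, hprev2]
        · by_cases hp : pvPrevLt l idx = true
          · -- prev is '<': A advances one
            have hp' : 0 < idx ∧ l[idx - 1]? = some '<' := by simpa [pvPrevLt] using hp
            have hA : pvLoopA l idx = pvLoopA l (idx + 1) := by
              rw [pvLoopA]
              have h2 : (if h0 : 0 < idx then some (l[idx - 1]'(by omega)) else none) = some '<' := by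
                rw [hprevd, if_pos hp'.1]; exact hp'.2
              simp [hlt, hc, hnextd, hn, h2]
            have hprev1 : pvPrevLt l (idx + 1) = true := by
              simp [pvPrevLt, List.getElem?_eq_getElem hlt, hc]
            rw [hA, ih (l.length - (idx + 1)) (by omega) (idx + 1) rfl, hGun, if_neg hn,
              if_pos hp, hprev1]
          · -- isolated '<': A returns true
            have hA : pvLoopA l idx = true := by
              rw [pvLoopA]
              have h2 : (if h0 : 0 < idx then some (l[idx - 1]'(by omega)) else none) ≠ some '<' := by
                rw [hprevd]
                intro he
                apply hp
                by_cases h0 : 0 < idx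
                · rw [if_pos h0] at he
                  simp [pvPrevLt, h0, he]
                · rw [if_neg h0] at he
                  simp at he
              simp [hlt, hc, hnextd, hn, h2]
            rw [hA, hGun, if_neg hn, if_neg (by simpa using hp)]
      · -- char not '<'
        have hA : pvLoopA l idx = pvLoopA l (idx + 1) := by
          rw [pvLoopA]; simp [hlt, hc]
        have hprev0 : pvPrevLt l (idx + 1) = false := by
          simp [pvPrevLt, List.getElem?_eq_getElem hlt, hc]
        have hG : pvG (pvPrevLt l idx) (l.drop idx) = pvG false (l.drop (idx + 1)) := by
          rw [hdrop, pvG]; simp [hc]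
        rw [hA, ih (l.length - (idx + 1)) (by omega) (idx + 1) rfl, hG, hprev0]
    · have hnil : l.drop idx = [] := List.drop_eq_nil_of_le (by omega)
      rw [pvLoopA]
      simp [hlt, hnil, pvG]

-- ===== VERDICT (by name: the statement is the Claim_ definition above) =====
theorem contains_plain_input_redirect_py_spec : Claim_equal_contains_plain_input_redirect_py := by
  intro cmd _
  unfold Spec_contains_plain_input_redirect_py
  unfold contains_plain_input_redirect_py contains_plain_input_redirect_py_alt
  rw [pvLoopA_eq_pvG, pvG_eq_loopB]
  simp [pvPrevLt]
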